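-- pv_equiv track=rewrite | github.com/bananahana720/PHX-houses-Dec-2025 | TRASH/migrations/migrate_to_work_items.py | infer_work_item_status
-- ===== SOURCE A (Python) =====
-- def infer_work_item_status(phases: dict) -> str:
--     """Determine overall work item status from phases."""
--     statuses = {phase["status"] for phase in phases.values()}
--
--     if "failed" in statuses:
--         return "failed"
--     elif all(s == "complete" for s in statuses):
--         return "completed"
--     elif "in_progress" in statuses:
--         return "in_progress"
--     elif all(s == "pending" for s in statuses):
--         return "pending"
--     else:
--         # Mixed complete/pending
--         return "in_progress"
-- ===== SOURCE B (Python) =====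
-- def infer_work_item_status(phases: dict) -> str:
--     """Determine overall work item status by folding statuses with a summary combiner
--     (failed absorbs, equal statuses keep, differing statuses collapse to a mixed mark),
--     then mapping the one-word summary to the overall status."""
--     summary = None  # no phases seen yet
--     for phase in phases.values():
--         s = phase["status"]
--         if summary == "failed" or s == "failed":
--             summary = "failed"
--         elif summary is None or summary == s:
--             summary = s
--         else:
--             summary = "__mixed__"
--     if summary == "failed":
--         return "failed"
--     if summary is None or summary == "complete":
--         return "completed"
--     if summary == "pending":
--         return "pending"
--     return "in_progress"
-- ===== Notes on version B (the rewrite author's own statement) =====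
-- stated objective: alternative
-- what changed: Instead of building a set of statuses and running membership/all() predicates over it, B folds the statuses with an associative-commutative summary combiner (failed absorbs, equal statuses keep, differing statuses collapse to a mixed mark) and maps the single summary word to the overall status.
import Mathlib
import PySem

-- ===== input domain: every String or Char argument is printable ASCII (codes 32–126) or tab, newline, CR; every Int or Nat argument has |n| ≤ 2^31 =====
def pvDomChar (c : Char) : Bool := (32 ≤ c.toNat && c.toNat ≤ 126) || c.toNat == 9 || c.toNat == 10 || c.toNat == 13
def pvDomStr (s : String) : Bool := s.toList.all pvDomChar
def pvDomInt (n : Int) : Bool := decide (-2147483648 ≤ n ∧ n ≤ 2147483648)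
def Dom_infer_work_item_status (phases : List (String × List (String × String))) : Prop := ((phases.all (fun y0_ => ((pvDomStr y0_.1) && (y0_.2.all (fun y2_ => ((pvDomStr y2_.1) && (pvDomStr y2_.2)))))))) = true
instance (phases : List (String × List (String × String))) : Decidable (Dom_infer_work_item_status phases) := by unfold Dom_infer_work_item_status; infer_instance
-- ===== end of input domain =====

-- B replaces A's set comprehension + membership/all() predicates by a fold with a failed-absorbing
-- equal-keeping summary combiner and a final mapping of the one-word summary; return value only.


-- ===== PORT A =====
-- phase["status"]: first-match lookup; total form used only under Pre_ (the key is present)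
def pvStatus (phase : List (String × String)) : String :=
  (PySem.Dict.get? (PySem.Dict.mk phase) "status").getD ""

-- the set comprehension {phase["status"] for phase in phases.values()} builds the set element by element
def infer_work_item_status (phases : List (String × List (String × String))) : String :=
  let statuses : PySem.Set String :=
    phases.foldl (fun acc p => PySem.Set.add acc (pvStatus p.2)) PySem.Set.empty
  if PySem.Set.contains statuses "failed" then "failed"
  else if statuses.all (fun s => s == "complete") then "completed"
  else if PySem.Set.contains statuses "in_progress" then "in_progress"
  else if statuses.all (fun s => s == "pending") then "pending"
  else "in_progress"

-- ===== PORT B =====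
-- the loop body of Source B: combine the running summary with one status
def pvCombine (x : Option String) (s : String) : Option String :=
  if x == some "failed" || s == "failed" then some "failed"
  else if x == none || x == some s then some s
  else some "__mixed__"

def infer_work_item_status_alt (phases : List (String × List (String × String))) : String :=
  let summary : Option String :=
    phases.foldl (fun a p => pvCombine a (pvStatus p.2)) none
  if summary == some "failed" then "failed"
  else if summary == none || summary == some "complete" then "completed"
  else if summary == some "pending" then "pending"
  else "in_progress"

-- ===== PRECONDITION & SPEC =====
-- Pre_ excludes exactly the inputs where some phase dict lacks the key "status": there Python A (and B) raises KeyError.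
def Pre_infer_work_item_status (phases : List (String × List (String × String))) : Prop :=
  ∀ p ∈ phases, "status" ∈ p.2.map Prod.fst
instance (phases : List (String × List (String × String))) : Decidable (Pre_infer_work_item_status phases) := by unfold Pre_infer_work_item_status; infer_instance

def pvWitness_infer_work_item_status : (List (String × List (String × String))) :=
  [("phase1", [("status", "complete")]), ("phase2", [("status", "pending")])]

def Spec_infer_work_item_status (phases : List (String × List (String × String))) (out : String) : Prop := out = infer_work_item_status_alt phases
instance (phases : List (String × List (String × String))) (out : String) : Decidable (Spec_infer_work_item_status phases out) := by unfold Spec_infer_work_item_status; infer_instance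

-- ===== CLAIM (what is proved, stated in full; the proofs are below) =====
def Claim_equal_infer_work_item_status : Prop := ∀ (phases : List (String × List (String × String))), Dom_infer_work_item_status phases → Pre_infer_work_item_status phases → Spec_infer_work_item_status phases (infer_work_item_status phases)

-- ===== LEMMAS AND PROOFS =====

lemma pv_contains_add (S : PySem.Set String) (x v : String) :
    PySem.Set.contains (PySem.Set.add S x) v = (PySem.Set.contains S v || (x == v)) := by
  rw [PySem.Set.add_eq_ite]
  split_ifs with h
  · by_cases hv : x = v
    · subst hv
      simp [PySem.Set.contains_eq_listContains, List.contains_eq_mem, h]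
    · simp [hv]
  · simp only [PySem.Set.contains_eq_listContains, List.contains_append,
      List.contains_cons, List.contains_nil, Bool.or_false]
    rw [BEq.comm]

lemma pv_all_add (S : PySem.Set String) (x : String) (p : String → Bool) :
    (PySem.Set.add S x).all p = (S.all p && p x) := by
  rw [PySem.Set.add_eq_ite]
  split_ifs with h
  · cases hp : S.all p
    · simp
    · have := List.all_eq_true.mp hp x h
      simp [this]
  · simp [List.all_append]

-- A's set fold, reduced to list-level any/all over the statuses
lemma pv_contains_fold (l : List (String × List (String × String))) (S : PySem.Set String) (v : String) :
    PySem.Set.contains (l.foldl (fun acc p => PySem.Set.add acc (pvStatus p.2)) S) v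
      = (PySem.Set.contains S v || l.any (fun p => pvStatus p.2 == v)) := by
  induction l generalizing S with
  | nil => simp
  | cons hd tl ih =>
    simp only [List.foldl_cons, List.any_cons, ih, pv_contains_add, Bool.or_assoc]

lemma pv_all_fold (l : List (String × List (String × String))) (S : PySem.Set String) (p : String → Bool) :
    (l.foldl (fun acc q => PySem.Set.add acc (pvStatus q.2)) S).all p
      = (S.all p && l.all (fun q => p (pvStatus q.2))) := by
  induction l generalizing S with
  | nil => simp
  | cons hd tl ih =>
    simp only [List.foldl_cons, List.all_cons, ih, pv_all_add, Bool.and_assoc]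

-- B's fold: once the summary is "failed", it stays "failed"
lemma pv_comb_failed (l : List (String × List (String × String))) :
    l.foldl (fun a p => pvCombine a (pvStatus p.2)) (some "failed") = some "failed" := by
  induction l with
  | nil => rfl
  | cons hd tl ih =>
    have hc : pvCombine (some "failed") (pvStatus hd.2) = some "failed" := by
      simp [pvCombine]
    simpa only [List.foldl_cons, hc] using ih

-- B's fold from a non-failed summary x, characterised by any/all over the remaining statuses
lemma pv_comb_some (l : List (String × List (String × String))) (x : String) (hx : x ≠ "failed") :
    l.foldl (fun a p => pvCombine a (pvStatus p.2)) (some x)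
      = (if l.any (fun p => pvStatus p.2 == "failed") then some "failed"
         else if l.all (fun p => pvStatus p.2 == x) then some x
         else some "__mixed__") := by
  induction l generalizing x with
  | nil => simp
  | cons hd tl ih =>
    simp only [List.foldl_cons, List.any_cons, List.all_cons]
    by_cases hf : pvStatus hd.2 = "failed"
    · have hc : pvCombine (some x) (pvStatus hd.2) = some "failed" := by
        simp [pvCombine, hf]
      rw [hc, pv_comb_failed]
      simp [hf]
    · have hbf : (pvStatus hd.2 == "failed") = false := by simp [hf]
      by_cases he : pvStatus hd.2 = x
      · have hc : pvCombine (some x) (pvStatus hd.2) = some x := by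
          simp only [pvCombine, he]
          simp [hx]
        have hbx : (pvStatus hd.2 == x) = true := by simp [he]
        rw [hc, ih x hx]
        simp only [hbf, hbx, Bool.false_or, Bool.true_and]
      · have hc : pvCombine (some x) (pvStatus hd.2) = some "__mixed__" := by
          simp only [pvCombine]
          simp [hx, hf]
          intro h; exact absurd h.symm he
        have hbx : (pvStatus hd.2 == x) = false := by simp [he]
        rw [hc, ih "__mixed__" (by decide)]
        simp only [hbf, hbx, Bool.false_or, Bool.false_and, Bool.false_eq_true,
          if_false, ite_self]

-- ===== VERDICT (by name: the statement is the Claim_ definition above) =====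
theorem infer_work_item_status_spec : Claim_equal_infer_work_item_status := by
  intro phases hDom hPre
  clear hDom hPre
  unfold Spec_infer_work_item_status infer_work_item_status infer_work_item_status_alt
  cases phases with
  | nil => rfl
  | cons hd tl =>
    simp only [List.foldl_cons, pv_contains_fold, pv_all_fold, pv_contains_add, pv_all_add]
    simp only [PySem.Set.empty, PySem.Set.contains_eq_listContains, List.contains_nil,
      List.all_nil, Bool.false_or, Bool.true_and]
    by_cases hf : pvStatus hd.2 = "failed"
    · have hc : pvCombine none (pvStatus hd.2) = some "failed" := by
        simp [pvCombine, hf]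
      simp only [hc, pv_comb_failed]
      simp [hf]
    · have hbf : (pvStatus hd.2 == "failed") = false := by simp [hf]
      have h1 : pvCombine none (pvStatus hd.2) = some (pvStatus hd.2) := by
        simp [pvCombine, hf]
      simp only [h1, pv_comb_some tl (pvStatus hd.2) hf]
      by_cases htf : tl.any (fun p => pvStatus p.2 == "failed")
      · simp [htf]
      · have haF : (tl.any fun p => pvStatus p.2 == "failed") = false := by simpa using htf
        simp only [haF, Bool.false_eq_true, if_false]
        by_cases hall : tl.all (fun p => pvStatus p.2 == pvStatus hd.2)
        · -- all statuses equal the head status; case on that status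
          have hanyeq : ∀ v : String, pvStatus hd.2 ≠ v →
              (tl.any fun p => pvStatus p.2 == v) = false := by
            intro v hv
            rw [List.any_eq_false]
            intro p hpm
            have h := List.all_eq_true.mp hall p hpm
            simp only [beq_iff_eq] at h ⊢
            rw [h]; exact hv
          have hallv : ∀ v : String, pvStatus hd.2 = v →
              (tl.all fun p => pvStatus p.2 == v) = true := by
            intro v hv; rw [← hv]; exact hall
          rw [if_pos hall]
          by_cases hc : pvStatus hd.2 = "complete"
          · simp [hc, hallv "complete" hc]
          · by_cases hip : pvStatus hd.2 = "in_progress"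
            · simp [hip]
            · by_cases hp : pvStatus hd.2 = "pending"
              · simp [hp, hallv "pending" hp,
                  hanyeq "in_progress" (by simp [hp])]
              · simp [hbf, hc, hip, hp, hanyeq "in_progress" hip]
        · -- mixed statuses: the summary is "__mixed__" and A falls through to "in_progress"
          have hallb : (tl.all fun p => pvStatus p.2 == pvStatus hd.2) = false := by
            simpa using hall
          have hc2 : ((pvStatus hd.2 == "complete") &&
              tl.all (fun p => pvStatus p.2 == "complete")) = false := by
            by_cases hcc : pvStatus hd.2 = "complete"
            · rw [← hcc] at *; simp [hallb]
            · simp [hcc]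
          have hp2 : ((pvStatus hd.2 == "pending") &&
              tl.all (fun p => pvStatus p.2 == "pending")) = false := by
            by_cases hpp : pvStatus hd.2 = "pending"
            · rw [← hpp] at *; simp [hallb]
            · simp [hpp]
          simp only [hallb, Bool.false_eq_true, if_false]
          simp [hbf, hc2, hp2]
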